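-- pv_equiv track=rewrite | github.com/mohammadtavakoli78/Bioinformatics | Project 2/main.py | find_desired_blocks
-- ===== SOURCE A (Python) =====
-- def find_desired_blocks(final_msa: list):
--     sequences_length = len(final_msa[0])
--     counter = 0
--     first = 0
--     blocks = []
--     for num in range(sequences_length):
--         temp = []
--         for seq in final_msa:
--             temp.append(seq[num])
--         if len(list(dict.fromkeys(temp))) != 1 and counter == 0:
--             first = num
--             counter += 1
--         elif len(list(dict.fromkeys(temp))) != 1 and counter != 0 and num < sequences_length - 1:
--             counter += 1
--         elif len(list(dict.fromkeys(temp))) != 1 and counter != 0 and num == sequences_length - 1: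
--             if counter >= 1:
--                 blocks.append(str(first) + ":" + str(num))
--             first = 0
--             counter = 0
--         elif len(list(dict.fromkeys(temp))) == 1 and counter != 0:
--             if counter > 1:
--                 blocks.append(str(first) + ":" + str(num - 1))
--             first = 0
--             counter = 0
--
--     return blocks
-- ===== SOURCE B (Python) =====
-- def find_desired_blocks(final_msa: list):
--     n = len(final_msa[0])
--     is_var = [len({seq[col] for seq in final_msa}) != 1 for col in range(n)]
--     blocks = []
--     col = 0
--     while col < n:
--         if is_var[col]:
--             start = col
--             while col < n and is_var[col]:
--                 col += 1
--             end = col - 1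
--             if end > start:
--                 blocks.append(f"{start}:{end}")
--         else:
--             col += 1
--     return blocks
-- ===== Notes on version B (the rewrite author's own statement) =====
-- stated objective: simpler
-- what changed: A's single loop with a four-branch counter/first state machine is replaced by a two-pass decomposition: first build the boolean table is_var of variable columns, then scan it for maximal runs and emit start:end for runs of length >= 2.
import Mathlib
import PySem

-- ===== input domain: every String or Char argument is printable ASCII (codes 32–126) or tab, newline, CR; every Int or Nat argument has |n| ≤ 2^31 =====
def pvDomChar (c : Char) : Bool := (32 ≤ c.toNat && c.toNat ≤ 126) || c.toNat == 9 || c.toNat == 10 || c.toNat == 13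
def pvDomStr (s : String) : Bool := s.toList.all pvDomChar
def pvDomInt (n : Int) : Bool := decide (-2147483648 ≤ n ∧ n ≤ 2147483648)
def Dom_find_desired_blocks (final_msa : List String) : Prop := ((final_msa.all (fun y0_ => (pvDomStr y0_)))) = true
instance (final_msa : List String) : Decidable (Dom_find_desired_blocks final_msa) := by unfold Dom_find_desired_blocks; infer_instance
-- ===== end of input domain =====

-- B replaces A's four-branch counter state machine with a two-pass decomposition (variability table, then run-length scan); objective: simpler. Equal return values on all inputs where A returns (Pre_ excludes empty/ragged MSAs, where A raises IndexError).


-- shared trivial helper: str(a) + ":" + str(b) (A's concatenation / B's f-string)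
def pvBlock (a b : Int) : String := PySem.Int.toStr a ++ ":" ++ PySem.Int.toStr b

-- ===== PORT A =====
-- final_msa[0] on an empty list raises IndexError in Python (excluded by Pre_); headD "" stands in.
def find_desired_blocks (final_msa : List String) : List String :=
  let sequences_length : Int := PySem.Str.len (final_msa.headD "")
  let r := (PySem.List.pyRange 0 sequences_length 1).foldl
    (fun (st : Int × Int × List String) num =>
      let counter := st.1
      let first := st.2.1
      let blocks := st.2.2
      let temp : List (Option Char) :=
        final_msa.foldl (fun t seq => t ++ [PySem.Str.pyGet? seq num]) []
      if (PySem.List.dedup temp).length ≠ 1 ∧ counter = 0 then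
        (counter + 1, num, blocks)
      else if (PySem.List.dedup temp).length ≠ 1 ∧ counter ≠ 0 ∧ num < sequences_length - 1 then
        (counter + 1, first, blocks)
      else if (PySem.List.dedup temp).length ≠ 1 ∧ counter ≠ 0 ∧ num = sequences_length - 1 then
        (0, 0, if counter ≥ 1 then blocks ++ [pvBlock first num] else blocks)
      else if (PySem.List.dedup temp).length = 1 ∧ counter ≠ 0 then
        (0, 0, if counter > 1 then blocks ++ [pvBlock first (num - 1)] else blocks)
      else (counter, first, blocks))
    (0, 0, [])
  r.2.2

-- ===== PORT B =====
-- is_var[col] = len({seq[col] for seq in final_msa}) != 1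
def pvVar (final_msa : List String) (col : Int) : Bool :=
  decide ((PySem.Set.ofList (final_msa.map (fun seq => PySem.Str.pyGet? seq col))).length ≠ 1)

-- inner while: length of the leading run of True
def pvRunLen : List Bool → Nat
  | true :: rest => pvRunLen rest + 1
  | _ => 0

-- outer while over is_var, tracking the current column index
def pvScan : List Bool → Int → List String
  | [], _ => []
  | false :: rest, col => pvScan rest (col + 1)
  | true :: rest, col =>
      let len := pvRunLen rest
      let endIdx := col + (len : Int)
      (if endIdx > col then [pvBlock col endIdx] else [])
        ++ pvScan (rest.drop len) (endIdx + 1)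
  termination_by bs _ => bs.length
  decreasing_by
    · simp only [List.length_cons]; omega
    · simp only [List.length_drop, List.length_cons]; omega

def find_desired_blocks_alt (final_msa : List String) : List String :=
  let n : Int := PySem.Str.len (final_msa.headD "")
  let is_var : List Bool := (PySem.List.pyRange 0 n 1).map (pvVar final_msa)
  pvScan is_var 0

-- ===== PRECONDITION & SPEC =====
-- Pre_ excludes exactly the inputs where A raises IndexError: the empty list (final_msa[0])
-- and ragged MSAs where some row is shorter than row 0 (seq[num]).
def Pre_find_desired_blocks (final_msa : List String) : Prop :=
  final_msa ≠ [] ∧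
    ∀ s ∈ final_msa, PySem.Str.len (final_msa.headD "") ≤ PySem.Str.len s
instance (final_msa : List String) : Decidable (Pre_find_desired_blocks final_msa) := by
  unfold Pre_find_desired_blocks; infer_instance

def pvWitness_find_desired_blocks : List String := ["acga", "agga", "acgt"]

def Spec_find_desired_blocks (final_msa : List String) (out : List String) : Prop := out = find_desired_blocks_alt final_msa
instance (final_msa : List String) (out : List String) : Decidable (Spec_find_desired_blocks final_msa out) := by unfold Spec_find_desired_blocks; infer_instance

-- ===== CLAIM (what is proved, stated in full; the proofs are below) =====
def Claim_equal_find_desired_blocks : Prop := ∀ (final_msa : List String), Dom_find_desired_blocks final_msa → Pre_find_desired_blocks final_msa → Spec_find_desired_blocks final_msa (find_desired_blocks final_msa)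

-- ===== LEMMAS AND PROOFS =====

-- A's state machine, abstracted to the per-column variability booleans
def pvFA : List Bool → Int → Int → Int → List String → List String
  | [], _, _, _, blocks => blocks
  | b :: rest, num, counter, first, blocks =>
    if b = true ∧ counter = 0 then
      pvFA rest (num + 1) (counter + 1) num blocks
    else if b = true ∧ counter ≠ 0 ∧ rest ≠ [] then
      pvFA rest (num + 1) (counter + 1) first blocks
    else if b = true ∧ counter ≠ 0 ∧ rest = [] then
      pvFA rest (num + 1) 0 0 (if counter ≥ 1 then blocks ++ [pvBlock first num] else blocks)
    else if b = false ∧ counter ≠ 0 then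
      pvFA rest (num + 1) 0 0 (if counter > 1 then blocks ++ [pvBlock first (num - 1)] else blocks)
    else pvFA rest (num + 1) counter first blocks


theorem pvFA_append (bs : List Bool) : ∀ num counter first blocks,
    pvFA bs num counter first blocks = blocks ++ pvFA bs num counter first [] := by
  induction bs with
  | nil => intro _ _ _ _; simp [pvFA]
  | cons b rest ih =>
    intro num counter first blocks
    simp only [pvFA]
    split_ifs with h1 h2 h3 h4
    all_goals (rw [ih]; try (conv_rhs => rw [ih]))
    all_goals simp [List.append_assoc]

theorem pvRunLen_le (bs : List Bool) : pvRunLen bs ≤ bs.length := by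
  induction bs with
  | nil => simp [pvRunLen]
  | cons b rest ih => cases b <;> simp [pvRunLen] <;> try omega


theorem pvRunLen_drop (bs : List Bool) (h : pvRunLen bs < bs.length) :
    bs.drop (pvRunLen bs) = false :: bs.drop (pvRunLen bs + 1) := by
  induction bs with
  | nil => simp at h
  | cons b rest ih =>
    cases b
    · simp [pvRunLen]
    · simp only [pvRunLen, List.drop_succ_cons]
      exact ih (by simpa [pvRunLen] using h)

theorem pvFA_run (bs : List Bool) : ∀ num counter first, 1 ≤ counter →
    pvFA bs num counter first [] =
      (if pvRunLen bs < bs.length then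
        (if counter + (pvRunLen bs : Int) > 1 then [pvBlock first (num + pvRunLen bs - 1)] else [])
          ++ pvFA (bs.drop (pvRunLen bs + 1)) (num + pvRunLen bs + 1) 0 0 []
      else if bs = [] then []
      else [pvBlock first (num + pvRunLen bs - 1)]) := by
  induction bs with
  | nil => intro num counter first hc; simp [pvFA, pvRunLen]
  | cons b rest ih =>
    intro num counter first hc
    have hcne : counter ≠ 0 := by omega
    cases b
    · -- false head: run ends here
      have hstep : pvFA (false :: rest) num counter first [] =
          pvFA rest (num + 1) 0 0 (if counter > 1 then [] ++ [pvBlock first (num - 1)] else []) := by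
        simp [pvFA, hcne]
      have h0 : pvRunLen (false :: rest) = 0 := rfl
      rw [hstep, pvFA_append, h0, if_pos (show (0:ℕ) < (false :: rest).length by simp)]
      have e1 : num + ((0:ℕ):Int) - 1 = num - 1 := by simp
      have e2 : num + ((0:ℕ):Int) + 1 = num + 1 := by simp
      rw [e1, e2, List.drop_succ_cons, List.drop_zero]
      by_cases hgt : counter > 1
      · rw [if_pos hgt, if_pos (show counter + ((0:ℕ):Int) > 1 by push_cast; omega)]
        try simp
      · rw [if_neg hgt, if_neg (show ¬(counter + ((0:ℕ):Int) > 1) by push_cast; omega)]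
        try simp
    · -- true head
      have hk : pvRunLen (true :: rest) = pvRunLen rest + 1 := rfl
      by_cases hrest : rest = []
      · subst hrest
        have h1 : pvFA [true] num counter first [] = [pvBlock first num] := by
          simp [pvFA, hcne, hc]
        rw [h1, hk]
        rw [if_neg (show ¬(pvRunLen ([] : List Bool) + 1 < ([true] : List Bool).length) by decide),
          if_neg (show ¬(([true] : List Bool) = []) by decide)]
        norm_num [pvRunLen]
      · have hstep : pvFA (true :: rest) num counter first [] =
            pvFA rest (num + 1) (counter + 1) first [] := by
          simp [pvFA, hcne, hrest]
        rw [hstep, ih (num + 1) (counter + 1) first (by omega), hk]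
        have ecast : ((pvRunLen rest + 1 : ℕ) : Int) = (pvRunLen rest : Int) + 1 := by push_cast; ring
        rw [ecast]
        have e2 : num + 1 + (pvRunLen rest : Int) - 1 = num + ((pvRunLen rest : Int) + 1) - 1 := by ring
        have e3 : num + 1 + (pvRunLen rest : Int) + 1 = num + ((pvRunLen rest : Int) + 1) + 1 := by ring
        rw [e2, e3]
        by_cases hlt : pvRunLen rest < rest.length
        · rw [if_pos hlt, if_pos (show pvRunLen rest + 1 < (true :: rest).length by
              simp only [List.length_cons]; omega), List.drop_succ_cons,
            if_pos (show counter + 1 + (pvRunLen rest : Int) > 1 by omega),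
            if_pos (show counter + ((pvRunLen rest : Int) + 1) > 1 by omega)]
        · have hT : ¬ (pvRunLen rest + 1 < (true :: rest).length) := by
            simp only [List.length_cons]; omega
          rw [if_neg hlt, if_neg hT, if_neg hrest,
            if_neg (show ¬(true :: rest = []) by simp)]

theorem pvFA_eq_scan (n : Nat) : ∀ (bs : List Bool), bs.length ≤ n →
    ∀ num, pvFA bs num 0 0 [] = pvScan bs num := by
  induction n with
  | zero =>
    intro bs hle num
    have : bs = [] := List.eq_nil_of_length_eq_zero (Nat.le_zero.mp hle)
    subst this; simp [pvFA, pvScan]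
  | succ n ihn =>
    intro bs hle num
    match bs with
    | [] => simp [pvFA, pvScan]
    | false :: rest =>
      have h1 : pvFA (false :: rest) num 0 0 [] = pvFA rest (num + 1) 0 0 [] := by
        simp [pvFA]
      rw [h1, pvScan]
      exact ihn rest (by simpa using Nat.le_of_succ_le_succ (by simpa using hle)) (num + 1)
    | true :: rest =>
      have h1 : pvFA (true :: rest) num 0 0 [] = pvFA rest (num + 1) 1 num [] := by
        simp [pvFA]
      rw [h1, pvFA_run rest (num + 1) 1 num le_rfl, pvScan]
      have hlen : rest.length ≤ n := by simpa using hle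
      by_cases hlt : pvRunLen rest < rest.length
      · -- a false follows the run
        have hdrop : rest.drop (pvRunLen rest) = false :: rest.drop (pvRunLen rest + 1) :=
          pvRunLen_drop rest hlt
        rw [if_pos hlt, hdrop, pvScan]
        have e1 : num + 1 + (pvRunLen rest : Int) - 1 = num + (pvRunLen rest : Int) := by ring
        have e2 : num + 1 + (pvRunLen rest : Int) + 1 = num + (pvRunLen rest : Int) + 1 + 1 := by ring
        rw [e1, e2, ihn (rest.drop (pvRunLen rest + 1)) (by simp [List.length_drop]; omega)
          (num + (pvRunLen rest : Int) + 1 + 1)]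
        by_cases hk0 : 1 ≤ pvRunLen rest
        · rw [if_pos (show (1:Int) + (pvRunLen rest : Int) > 1 by omega),
            if_pos (show num + (pvRunLen rest : Int) > num by omega)]
        · rw [if_neg (show ¬((1:Int) + (pvRunLen rest : Int) > 1) by omega),
            if_neg (show ¬(num + (pvRunLen rest : Int) > num) by omega)]
      · rw [if_neg hlt]
        by_cases hrest : rest = []
        · subst hrest
          rw [if_pos rfl]
          simp [pvScan, pvRunLen]
        · rw [if_neg hrest]
          have hk : pvRunLen rest = rest.length := Nat.le_antisymm (pvRunLen_le rest) (by omega)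
          have hk1 : 1 ≤ pvRunLen rest := by
            rw [hk]; exact Nat.succ_le_of_lt (List.length_pos_of_ne_nil hrest)
          rw [if_pos (show num + (pvRunLen rest : Int) > num by omega)]
          have e1 : num + 1 + (pvRunLen rest : Int) - 1 = num + (pvRunLen rest : Int) := by ring
          rw [e1]
          have hdrop : rest.drop (pvRunLen rest) = [] := by rw [hk]; simp
          rw [hdrop, pvScan]
          simp

def pvBodyA (final_msa : List String) (n : Int)
    (st : Int × Int × List String) (num : Int) : Int × Int × List String :=
  let counter := st.1
  let first := st.2.1
  let blocks := st.2.2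
  let temp : List (Option Char) :=
    final_msa.foldl (fun t seq => t ++ [PySem.Str.pyGet? seq num]) []
  if (PySem.List.dedup temp).length ≠ 1 ∧ counter = 0 then
    (counter + 1, num, blocks)
  else if (PySem.List.dedup temp).length ≠ 1 ∧ counter ≠ 0 ∧ num < n - 1 then
    (counter + 1, first, blocks)
  else if (PySem.List.dedup temp).length ≠ 1 ∧ counter ≠ 0 ∧ num = n - 1 then
    (0, 0, if counter ≥ 1 then blocks ++ [pvBlock first num] else blocks)
  else if (PySem.List.dedup temp).length = 1 ∧ counter ≠ 0 then
    (0, 0, if counter > 1 then blocks ++ [pvBlock first (num - 1)] else blocks)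
  else (counter, first, blocks)

theorem pvFoldA (final_msa : List String) (n : Int) :
    ∀ (k : Nat) (num : Int) (c f1 : Int) (bl : List String), n - num = (k : Int) →
    ((PySem.List.pyRange num n 1).foldl (pvBodyA final_msa n) (c, f1, bl)).2.2
    = pvFA ((PySem.List.pyRange num n 1).map (pvVar final_msa)) num c f1 bl := by
  intro k
  induction k with
  | zero =>
    intro num c f1 bl h
    rw [PySem.List.pyRange_one_eq_nil (by omega)]
    simp [pvFA]
  | succ k ihn =>
    intro num c f1 bl h
    rw [PySem.List.pyRange_one_cons (by omega)]
    simp only [List.foldl_cons, List.map_cons]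
    have htemp : (final_msa.foldl (fun t seq => t ++ [PySem.Str.pyGet? seq num]) [])
        = final_msa.map (fun seq => PySem.Str.pyGet? seq num) := by
      simpa using PySem.List.foldl_append_singleton_eq_map
        (fun seq => PySem.Str.pyGet? seq num) final_msa []
    have hiff1 : ((PySem.List.dedup (final_msa.map fun seq => PySem.Str.pyGet? seq num)).length ≠ 1)
        ↔ pvVar final_msa num = true := by simp [pvVar]
    have hiff2 : ((PySem.List.dedup (final_msa.map fun seq => PySem.Str.pyGet? seq num)).length = 1)
        ↔ (pvVar final_msa num = false) := by
      rw [← not_iff_not]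
      simpa using hiff1
    have hbody : pvBodyA final_msa n (c, f1, bl) num =
        (if pvVar final_msa num = true ∧ c = 0 then (c + 1, num, bl)
         else if pvVar final_msa num = true ∧ c ≠ 0 ∧ num < n - 1 then (c + 1, f1, bl)
         else if pvVar final_msa num = true ∧ c ≠ 0 ∧ num = n - 1 then
           (0, 0, if c ≥ 1 then bl ++ [pvBlock f1 num] else bl)
         else if pvVar final_msa num = false ∧ c ≠ 0 then
           (0, 0, if c > 1 then bl ++ [pvBlock f1 (num - 1)] else bl)
         else (c, f1, bl)) := by
      simp only [pvBodyA, htemp, hiff1, hiff2]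
    have hr2 : (((PySem.List.pyRange (num + 1) n 1).map (pvVar final_msa)) = []) ↔ (num = n - 1) := by
      rw [List.map_eq_nil_iff]
      constructor
      · intro he
        by_contra hne
        have hlt2 : num + 1 < n := by omega
        rw [PySem.List.pyRange_one_cons hlt2] at he
        exact List.cons_ne_nil _ _ he
      · intro he; exact PySem.List.pyRange_one_eq_nil (by omega)
    have hlt : (num < n - 1) ↔ ¬(num = n - 1) := by constructor <;> intro <;> omega
    rw [hbody]
    simp only [pvFA, hlt, hr2, ne_eq]
    split_ifs
    all_goals exact ihn (num + 1) _ _ _ (by omega)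

-- ===== VERDICT (by name: the statement is the Claim_ definition above) =====
theorem find_desired_blocks_spec : Claim_equal_find_desired_blocks := by
  intro final_msa _hdom _hpre
  unfold Spec_find_desired_blocks
  have hn : 0 ≤ PySem.Str.len (final_msa.headD "") := by
    rw [PySem.Str.len_eq]; exact Int.natCast_nonneg _
  have heqA : find_desired_blocks final_msa =
      ((PySem.List.pyRange 0 (PySem.Str.len (final_msa.headD "")) 1).foldl
        (pvBodyA final_msa (PySem.Str.len (final_msa.headD ""))) (0, 0, [])).2.2 := rfl
  have heqB : find_desired_blocks_alt final_msa =
      pvScan ((PySem.List.pyRange 0 (PySem.Str.len (final_msa.headD "")) 1).map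
        (pvVar final_msa)) 0 := rfl
  rw [heqA, heqB,
    pvFoldA final_msa (PySem.Str.len (final_msa.headD ""))
      (PySem.Str.len (final_msa.headD "")).toNat 0 0 0 [] (by omega),
    pvFA_eq_scan ((PySem.List.pyRange 0 (PySem.Str.len (final_msa.headD "")) 1).map
      (pvVar final_msa)).length _ le_rfl 0]
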